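-- pv_equiv track=rewrite | github.com/toli-belo/dwf | dwf/lowlevel.py | create_bitdata_stream
-- ===== SOURCE A (Python) =====
-- def create_bitdata_stream(data, bits, msb_first=False):
--     result = []
--     for v in data:
--         for i in range(bits):
--             if msb_first:
--                 mask = 1 << (bits - i - 1)
--             else:
--                 mask = 1 << i
--             result.append((v & mask) != 0)
--     return result
-- ===== SOURCE B (Python) =====
-- def create_bitdata_stream(data, bits, msb_first=False):
--     def chunk(v, n):
--         # divide and conquer: split the n-bit field into a low half and a high half;
--         # 0 and -1 are fixed points of the shift, so their fields are constant
--         if n <= 0: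
--             return []
--         if v == 0:
--             return [False] * n
--         if v == -1:
--             return [True] * n
--         if n == 1:
--             return [(v & 1) != 0]
--         h = n // 2
--         lo = chunk(v, h)
--         hi = chunk(v >> h, n - h)
--         return hi + lo if msb_first else lo + hi
--     cache = {}
--     result = []
--     for v in data:
--         c = cache.get(v)
--         if c is None:
--             c = chunk(v, bits)
--             cache[v] = c
--         result += c
--     return result
-- ===== Notes on version B (the rewrite author's own statement) =====
-- stated objective: alternative
-- what changed: B replaces A's per-bit mask-and-branch index loop with a divide-and-conquer recursion that splits each value's n-bit field into a low and a high half (shifting the value by the half width), and caches the computed chunk per distinct value in a dict so repeated values are expanded once.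
import Mathlib
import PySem

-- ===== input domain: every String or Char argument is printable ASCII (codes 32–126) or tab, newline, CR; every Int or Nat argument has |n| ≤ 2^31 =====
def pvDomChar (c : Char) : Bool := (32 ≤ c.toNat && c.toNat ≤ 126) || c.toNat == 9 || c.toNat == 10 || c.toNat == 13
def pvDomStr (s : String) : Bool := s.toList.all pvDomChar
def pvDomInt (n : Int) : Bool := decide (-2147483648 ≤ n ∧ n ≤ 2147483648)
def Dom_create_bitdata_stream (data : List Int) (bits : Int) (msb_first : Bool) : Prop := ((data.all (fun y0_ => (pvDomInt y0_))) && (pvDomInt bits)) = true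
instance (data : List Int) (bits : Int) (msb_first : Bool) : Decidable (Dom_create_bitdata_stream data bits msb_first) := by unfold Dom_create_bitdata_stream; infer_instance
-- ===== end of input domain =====

-- B replaces A's per-bit mask-and-branch index loop by a divide-and-conquer recursion splitting each value's bit field into halves, with a per-value cache of computed chunks; return values proved equal on all inputs.

-- ===== PORT A =====
-- literal transliteration of A: per element, per bit index, branch on msb_first to build the mask
-- (the shift amounts i and bits - i - 1 are nonnegative for every i in range(bits), so .toNat is exact there)
def create_bitdata_stream (data : List Int) (bits : Int) (msb_first : Bool) : List Bool :=
  data.foldl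
    (fun result v =>
      (PySem.List.pyRange 0 bits 1).foldl
        (fun result i =>
          let mask : Int := if msb_first then (1 : Int) <<< (bits - i - 1).toNat else (1 : Int) <<< i.toNat
          result ++ [decide (PySem.Int.band v mask ≠ 0)])
        result)
    []

-- ===== PORT B =====
-- transliteration of B's inner helper 'chunk': divide and conquer on the bit-field width n
-- (the shift amount h = n // 2 is nonnegative whenever the recursive case is reached, so .toNat is exact there)
def pvChunk (msb_first : Bool) (v : Int) (n : Int) : List Bool :=
  if _h0 : n ≤ 0 then []
  else if _hz : v = 0 then List.replicate n.toNat false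
  else if _hm1 : v = -1 then List.replicate n.toNat true
  else if _h1 : n = 1 then [decide (PySem.Int.band v 1 ≠ 0)]
  else
    let h := PySem.Int.floordiv n 2
    let lo := pvChunk msb_first v h
    let hi := pvChunk msb_first (v >>> h.toNat) (n - h)
    if msb_first then hi ++ lo else lo ++ hi
termination_by n.toNat
decreasing_by
  · simp only [PySem.Int.floordiv, Int.fdiv_eq_ediv]; omega
  · simp only [PySem.Int.floordiv, Int.fdiv_eq_ediv]; omega

-- literal transliteration of B's driver loop: a cache dict of already-computed chunks per value
def create_bitdata_stream_alt (data : List Int) (bits : Int) (msb_first : Bool) : List Bool :=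
  (data.foldl
    (fun (acc : List Bool × PySem.Dict Int (List Bool)) v =>
      match PySem.Dict.get? acc.2 v with
      | some c => (acc.1 ++ c, acc.2)
      | none =>
          let c := pvChunk msb_first v bits
          (acc.1 ++ c, PySem.Dict.insert acc.2 v c))
    ([], PySem.Dict.empty)).1

-- ===== PRECONDITION & SPEC =====
def Spec_create_bitdata_stream (data : List Int) (bits : Int) (msb_first : Bool) (out : List Bool) : Prop := out = create_bitdata_stream_alt data bits msb_first
instance (data : List Int) (bits : Int) (msb_first : Bool) (out : List Bool) : Decidable (Spec_create_bitdata_stream data bits msb_first out) := by unfold Spec_create_bitdata_stream; infer_instance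

-- ===== CLAIM (what is proved, stated in full; the proofs are below) =====
def Claim_equal_create_bitdata_stream : Prop := ∀ (data : List Int) (bits : Int) (msb_first : Bool), Dom_create_bitdata_stream data bits msb_first → Spec_create_bitdata_stream data bits msb_first (create_bitdata_stream data bits msb_first)

-- ===== LEMMAS AND PROOFS =====

-- the canonical LSB-first bit list of v over n bits
def lsbBits (v : Int) (n : Nat) : List Bool :=
  (List.range n).map (fun (i : Nat) => decide (PySem.Int.band (HShiftRight.hShiftRight v i) 1 ≠ 0))

-- appending one element per iteration is mapping
lemma foldl_append_singleton {α β : Type} (f : α → β) (l : List α) (r : List β) :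
    l.foldl (fun acc x => acc ++ [f x]) r = r ++ l.map f := by
  induction l generalizing r with
  | nil => simp
  | cons x xs ih => simp [List.foldl_cons, ih]

-- testing bit k with a mask (A) and by shifting (B) agree, for every Int, including negatives
lemma band_shift_eq (v : Int) (k : Nat) :
    (PySem.Int.band v ((1 : Int) <<< k) ≠ 0) ↔ (PySem.Int.band (v >>> k) 1 ≠ 0) := by
  have hpow : ((1 : Int) <<< k) = ((1 <<< k : Nat) : Int) := rfl
  rcases v with m | m
  · have hsr : (Int.ofNat m) >>> k = Int.ofNat (m >>> k) := rfl
    rw [hpow, hsr]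
    show (PySem.Int.band (↑m) (↑(1 <<< k : Nat)) ≠ 0) ↔ (PySem.Int.band (↑(m >>> k)) ((1:Nat):Int) ≠ 0)
    rw [PySem.Int.band_natCast, PySem.Int.band_natCast]
    simp only [ne_eq, Int.natCast_eq_zero]
    rw [Nat.one_shiftLeft, Nat.and_two_pow, Nat.and_one_is_mod, Nat.shiftRight_eq_div_pow,
      Nat.testBit_eq_decide_div_mod_eq]
    rcases Nat.decEq (m / 2 ^ k % 2) 1 with h | h
    · simp [h]
    · simp [h]
  · have hsr : (Int.negSucc m) >>> k = Int.negSucc (m >>> k) := rfl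
    rw [hpow, hsr]
    show (PySem.Int.band (Int.negSucc m) (↑(1 <<< k : Nat)) ≠ 0) ↔ (PySem.Int.band (Int.negSucc (m >>> k)) ((1:Nat):Int) ≠ 0)
    unfold PySem.Int.band
    have h1 : ¬ (0 : Int) ≤ Int.negSucc m := Int.not_le.mpr (Int.negSucc_lt_zero m)
    have h2 : ¬ (0 : Int) ≤ Int.negSucc (m >>> k) := Int.not_le.mpr (Int.negSucc_lt_zero _)
    rw [if_neg h1, if_pos (by positivity), if_neg h2, if_pos (by positivity)]
    have e1 : (-(Int.negSucc m) - 1).toNat = m := by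
      simp [Int.negSucc_eq]
    have e2 : (-(Int.negSucc (m >>> k)) - 1).toNat = m >>> k := by
      simp [Int.negSucc_eq]
      rfl
    rw [e1, e2]
    simp only [Int.toNat_natCast, ne_eq, Int.natCast_eq_zero]
    rw [Nat.one_shiftLeft, Nat.two_pow_and, Nat.one_and_eq_mod_two, Nat.shiftRight_eq_div_pow,
      Nat.testBit_eq_decide_div_mod_eq]
    have hp : 0 < 2 ^ k := Nat.pow_pos (by norm_num)
    rcases Nat.decEq (m / 2 ^ k % 2) 1 with h | h <;> simp [h] <;> omega

-- right shifts on Int compose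
lemma int_shiftRight_comp (v : Int) (a b : Nat) : (v >>> a) >>> b = v >>> (a + b) := by
  rcases v with m | m
  · show Int.ofNat ((m >>> a) >>> b) = Int.ofNat (m >>> (a + b))
    rw [Nat.shiftRight_add]
  · show Int.negSucc ((m >>> a) >>> b) = Int.negSucc (m >>> (a + b))
    rw [Nat.shiftRight_add]

-- splitting an LSB-first bit list at any point h ≤ n
lemma lsbBits_split (v : Int) (h n : Nat) (hle : h ≤ n) :
    lsbBits v n = lsbBits v h ++ lsbBits (v >>> h) (n - h) := by
  unfold lsbBits
  conv_lhs => rw [show n = h + (n - h) from by omega, List.range_add]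
  rw [List.map_append, List.map_map]
  congr 1
  apply List.map_congr_left
  intro i _
  simp only [Function.comp_apply]
  rw [← int_shiftRight_comp]

-- the bit lists of the two shift fixed points 0 and -1 are constant
lemma lsbBits_zero (n : Nat) : lsbBits 0 n = List.replicate n false := by
  unfold lsbBits
  rw [show (fun (i : Nat) => decide (PySem.Int.band (HShiftRight.hShiftRight (0 : Int) i) 1 ≠ 0))
      = (fun _ => false) from funext fun i => by
    show decide (PySem.Int.band (Int.ofNat (0 >>> i)) 1 ≠ 0) = false
    rw [Nat.zero_shiftRight]
    decide]
  rw [List.map_const', List.length_range]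

lemma lsbBits_negOne (n : Nat) : lsbBits (-1) n = List.replicate n true := by
  unfold lsbBits
  rw [show (fun (i : Nat) => decide (PySem.Int.band (HShiftRight.hShiftRight (-1 : Int) i) 1 ≠ 0))
      = (fun _ => true) from funext fun i => by
    show decide (PySem.Int.band (Int.negSucc (0 >>> i)) 1 ≠ 0) = true
    rw [Nat.zero_shiftRight]
    decide]
  rw [List.map_const', List.length_range]

-- B's divide-and-conquer chunk computes the (possibly reversed) canonical bit list
lemma pvChunk_eq (msb_first : Bool) (v : Int) (n : Int) :
    pvChunk msb_first v n =
      (if msb_first then (lsbBits v n.toNat).reverse else lsbBits v n.toNat) := by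
  rw [pvChunk]
  split_ifs with h0 hz hneg h1 hm hm
  · have e : n.toNat = 0 := by omega
    simp [e, lsbBits]
  · have e : n.toNat = 0 := by omega
    simp [e, lsbBits]
  · simp_all [lsbBits_zero, List.reverse_replicate]
  · simp_all [lsbBits_zero]
  · simp_all [lsbBits_negOne, List.reverse_replicate]
  · simp_all [lsbBits_negOne]
  · have e : n.toNat = 1 := by omega
    simp [e, lsbBits, List.range_succ]
  · have e : n.toNat = 1 := by omega
    simp [e, lsbBits, List.range_succ]
  · -- msb_first = true, recursive case
    have hbounds : 1 ≤ PySem.Int.floordiv n 2 ∧ PySem.Int.floordiv n 2 < n := by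
      simp only [PySem.Int.floordiv, Int.fdiv_eq_ediv]; omega
    rename_i hmsb
    show pvChunk msb_first (v >>> (PySem.Int.floordiv n 2).toNat) (n - PySem.Int.floordiv n 2) ++
        pvChunk msb_first v (PySem.Int.floordiv n 2) = (lsbBits v n.toNat).reverse
    rw [pvChunk_eq msb_first v (PySem.Int.floordiv n 2),
        pvChunk_eq msb_first (v >>> (PySem.Int.floordiv n 2).toNat) (n - PySem.Int.floordiv n 2)]
    have hsplit : lsbBits v n.toNat =
        lsbBits v (PySem.Int.floordiv n 2).toNat ++
          lsbBits (v >>> (PySem.Int.floordiv n 2).toNat) ((n - PySem.Int.floordiv n 2).toNat) := by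
      have e : (n - PySem.Int.floordiv n 2).toNat = n.toNat - (PySem.Int.floordiv n 2).toNat := by
        omega
      rw [e]
      exact lsbBits_split v _ _ (by omega)
    simp [hmsb, hsplit, List.reverse_append]
  · -- msb_first = false, recursive case
    have hbounds : 1 ≤ PySem.Int.floordiv n 2 ∧ PySem.Int.floordiv n 2 < n := by
      simp only [PySem.Int.floordiv, Int.fdiv_eq_ediv]; omega
    rename_i hmsb
    show pvChunk msb_first v (PySem.Int.floordiv n 2) ++
        pvChunk msb_first (v >>> (PySem.Int.floordiv n 2).toNat) (n - PySem.Int.floordiv n 2) =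
        lsbBits v n.toNat
    rw [pvChunk_eq msb_first v (PySem.Int.floordiv n 2),
        pvChunk_eq msb_first (v >>> (PySem.Int.floordiv n 2).toNat) (n - PySem.Int.floordiv n 2)]
    have hsplit : lsbBits v n.toNat =
        lsbBits v (PySem.Int.floordiv n 2).toNat ++
          lsbBits (v >>> (PySem.Int.floordiv n 2).toNat) ((n - PySem.Int.floordiv n 2).toNat) := by
      have e : (n - PySem.Int.floordiv n 2).toNat = n.toNat - (PySem.Int.floordiv n 2).toNat := by
        omega
      rw [e]
      exact lsbBits_split v _ _ (by omega)
    simp [hmsb, hsplit]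
termination_by n.toNat
decreasing_by
  all_goals omega

-- the cached fold computes the same as the plain chunk-appending fold
lemma foldl_cached (msb_first : Bool) (bits : Int) (l : List Int) (r : List Bool)
    (d : PySem.Dict Int (List Bool))
    (hd : ∀ k c, PySem.Dict.get? d k = some c → c = pvChunk msb_first k bits) :
    (l.foldl
      (fun (acc : List Bool × PySem.Dict Int (List Bool)) v =>
        match PySem.Dict.get? acc.2 v with
        | some c => (acc.1 ++ c, acc.2)
        | none =>
            let c := pvChunk msb_first v bits
            (acc.1 ++ c, PySem.Dict.insert acc.2 v c))
      (r, d)).1 = l.foldl (fun result v => result ++ pvChunk msb_first v bits) r := by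
  induction l generalizing r d with
  | nil => rfl
  | cons v tl ih =>
    simp only [List.foldl_cons]
    cases h : PySem.Dict.get? d v with
    | some c =>
      rw [hd v c h]
      exact ih _ _ hd
    | none =>
      refine ih _ _ ?_
      intro k c hk
      rw [PySem.Dict.get?_insert] at hk
      split_ifs at hk with he
      · cases hk; rw [he]
      · exact hd k c hk

-- ===== VERDICT (by name: the statement is the Claim_ definition above) =====
theorem create_bitdata_stream_spec : Claim_equal_create_bitdata_stream := by
  intro data bits msb_first _
  unfold Spec_create_bitdata_stream create_bitdata_stream create_bitdata_stream_alt
  rw [foldl_cached msb_first bits data [] PySem.Dict.empty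
    (by intro k c hk; rw [PySem.Dict.get?_empty] at hk; cases hk)]
  congr 1
  funext r v
  simp only [foldl_append_singleton, pvChunk_eq]
  cases msb_first with
  | false =>
    simp only [Bool.false_eq_true, ite_false]
    congr 1
    rw [PySem.List.pyRange_one, List.map_map]
    unfold lsbBits
    simp only [Int.sub_zero]
    apply List.map_congr_left
    intro i hi
    simp only [List.mem_range] at hi
    have e : ((0 : Int) + (i : Int)).toNat = i := by omega
    simp only [Function.comp_apply, e]
    exact decide_eq_decide.mpr (band_shift_eq v i)
  | true =>
    simp only [ite_true]
    congr 1
    apply List.ext_getElem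
    · simp [PySem.List.length_pyRange_one, lsbBits]
    · intro k h1 h2
      simp only [List.length_map, PySem.List.length_pyRange_one] at h1
      simp only [lsbBits, List.length_reverse, List.length_map, List.length_range] at h2
      rw [List.getElem_map, PySem.List.getElem_pyRange_one]
      unfold lsbBits
      rw [List.getElem_reverse]
      simp only [List.length_map, List.length_range]
      rw [List.getElem_map, List.getElem_range]
      have e2 : (bits - (0 + (k : Int)) - 1).toNat = (bits.toNat - 1 - k) := by omega
      rw [e2]
      exact decide_eq_decide.mpr (band_shift_eq v _)
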